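-- pv_equiv track=rewrite | github.com/Saadiinho/viveris | test_script.py | map_category_to_recycling_type
-- ===== SOURCE A (Python) =====
-- def map_category_to_recycling_type(category, packaging="", packaging_materials=[], recycling_tags=[], ecoscore_grade=None, co2_total=None):
--     """
--     Mappe une catégorie ou emballage à un type de poubelle spécifique.
--     """
--     category = category.lower()
--     packaging = packaging.lower()
--
--     # Définir les types de poubelles
--     bins = [
--         ("Verte", "Verre (sans bouchons ni couvercles)"),
--         ("Jaune", "Plastique, carton et emballages"),
--         ("Bleue", "Papier et journaux"),
--         ("Rouge", "Métal"),
--         ("Noire", "Déchets ménagers classiques"),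
--         ("Marron", "Biodéchets"),
--         ("Déchets spéciaux", "Piles, électroniques et déchets dangereux"),
--         ("Autre", "Non catégorisé")
--     ]
--
--     # Vérre
--     if any(keyword in category + packaging for keyword in [
--         "verre", "bocal", "bouteille en verre", "pot",
--         "glass", "jar", "glass bottle", "container", "fr:bocal", "fr:verre"
--     ]) or "en:glass" in packaging_materials:
--         return bins[0], 4
--
--     # Plastique, carton et emballages
--     if any(keyword in category + packaging for keyword in [
--         "plastique", "carton", "papier", "emballage", "bouteille", "canette", "alu", "aluminium",
--         "plastic", "cardboard", "paper", "packaging", "bottle", "can", "aluminum",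
--         "card-box", "pet-bottle", "mixed plastic-bag", "fr:sac plastique", "fr:bouteille en pet",
--         "fr:carton plastique" , "étui"
--     ]) or any(material in packaging_materials for material in [
--         "en:plastic", "en:pet-1-polyethylene-terephthalate", "en:cardboard"
--     ]):
--         return bins[1], 5
--
--     # Papier et journaux
--     if any(keyword in category + packaging for keyword in [
--         "papier", "journaux", "prospectus", "annuaires",
--         "paper", "newspaper", "brochures", "fr:papier", "fr:prospectus"
--     ]):
--         return bins[2], 6
--
--     # Métal
--     if any(keyword in category + packaging for keyword in [
--         "metal", "aluminium", "can", "boîte métal", "steel-can",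
--         "aluminum", "drink can", "fr:canette métal recyclabbe à l'infini",
--         "fr:cannette aluminium", "fr:boîte métal à recycler", "fr:boîte en métal"
--     ]) or "en:aluminium" in packaging_materials:
--         return bins[3], 6
--
--     # Biodéchets
--     if any(keyword in category + packaging for keyword in [
--         "organique", "compost", "déchets alimentaires", "épluchures",
--         "organic", "food waste", "compostable", "kitchen waste", "peelings",
--         "fr:compost", "fr:épluchures", "fr:organique"
--     ]):
--         return bins[5], 7
--
--     # Déchets ménagers classiques
--     if any(keyword in category + packaging for keyword in [
--         "ordures ménagères", "non recyclable", "déchet général", "restes",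
--         "household waste", "non-recyclable", "general waste", "leftovers",
--         "fr:non recyclable", "fr:restes", "fr:ordures ménagères"
--     ]):
--         return bins[4], 3
--
--     # Déchets spéciaux
--     if any(keyword in category + packaging for keyword in [
--         "pile", "batterie", "électronique", "électroménager", "téléphone", "ordinateur", "déchet dangereux",
--         "battery", "electronics", "appliance", "phone", "computer", "hazardous waste",
--         "fr:pile", "fr:électronique", "fr:batterie", "fr:déchets dangereux"
--     ]):
--         return bins[6], 10
--
--     # Analyse supplémentaire avec ecoscore et co2_total
--     if ecoscore_grade and ecoscore_grade.lower() in ['a', 'b']: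
--         return bins[1], 6  # Encourage le recyclage des produits écologiques
--
--     # Par défaut
--     return bins[7], 1
-- ===== SOURCE B (Python) =====
-- # Flat pattern index + min-aggregation: collect every matching pattern's bin index
-- # in one pass, then pick the highest-priority (smallest) index.
--
-- _GROUPS = [
--     (["verre", "bocal", "bouteille en verre", "pot",
--       "glass", "jar", "glass bottle", "container", "fr:bocal", "fr:verre"],
--      ["en:glass"]),
--     (["plastique", "carton", "papier", "emballage", "bouteille", "canette", "alu", "aluminium",
--       "plastic", "cardboard", "paper", "packaging", "bottle", "can", "aluminum",
--       "card-box", "pet-bottle", "mixed plastic-bag", "fr:sac plastique", "fr:bouteille en pet",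
--       "fr:carton plastique", "étui"],
--      ["en:plastic", "en:pet-1-polyethylene-terephthalate", "en:cardboard"]),
--     (["papier", "journaux", "prospectus", "annuaires",
--       "paper", "newspaper", "brochures", "fr:papier", "fr:prospectus"],
--      []),
--     (["metal", "aluminium", "can", "boîte métal", "steel-can",
--       "aluminum", "drink can", "fr:canette métal recyclabbe à l'infini",
--       "fr:cannette aluminium", "fr:boîte métal à recycler", "fr:boîte en métal"],
--      ["en:aluminium"]),
--     (["organique", "compost", "déchets alimentaires", "épluchures",
--       "organic", "food waste", "compostable", "kitchen waste", "peelings",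
--       "fr:compost", "fr:épluchures", "fr:organique"],
--      []),
--     (["ordures ménagères", "non recyclable", "déchet général", "restes",
--       "household waste", "non-recyclable", "general waste", "leftovers",
--       "fr:non recyclable", "fr:restes", "fr:ordures ménagères"],
--      []),
--     (["pile", "batterie", "électronique", "électroménager", "téléphone", "ordinateur", "déchet dangereux",
--       "battery", "electronics", "appliance", "phone", "computer", "hazardous waste",
--       "fr:pile", "fr:électronique", "fr:batterie", "fr:déchets dangereux"],
--      []),
-- ]
--
-- _RESULTS = [
--     (("Verte", "Verre (sans bouchons ni couvercles)"), 4),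
--     (("Jaune", "Plastique, carton et emballages"), 5),
--     (("Bleue", "Papier et journaux"), 6),
--     (("Rouge", "Métal"), 6),
--     (("Marron", "Biodéchets"), 7),
--     (("Noire", "Déchets ménagers classiques"), 3),
--     (("Déchets spéciaux", "Piles, électroniques et déchets dangereux"), 10),
-- ]
--
-- # one flat stream of (pattern, is_material, bin-rule index)
-- _PATTERNS = [(p, is_mat, i)
--              for i, (kws, mats) in enumerate(_GROUPS)
--              for lst, is_mat in ((kws, False), (mats, True))
--              for p in lst]
--
--
-- def map_category_to_recycling_type(category, packaging="", packaging_materials=[], recycling_tags=[], ecoscore_grade=None, co2_total=None):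
--     text = category.lower() + packaging.lower()
--     matched = [i for (p, is_mat, i) in _PATTERNS
--                if (p in packaging_materials if is_mat else p in text)]
--     if matched:
--         return _RESULTS[min(matched)]
--     if ecoscore_grade and ecoscore_grade.lower() in ['a', 'b']:
--         return ("Jaune", "Plastique, carton et emballages"), 6
--     return ("Autre", "Non catégorisé"), 1
-- ===== Notes on version B (the rewrite author's own statement) =====
-- stated objective: alternative
-- what changed: Instead of A's seven-branch early-return if-cascade with per-branch any() tests, B flattens all keywords and materials into one (pattern, is_material, bin-index) stream, collects in a single comprehension the indices of ALL matching patterns, and returns the result of the minimum (highest-priority) index; min-aggregation over a flat pattern index replaces the priority cascade.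
import Mathlib
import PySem

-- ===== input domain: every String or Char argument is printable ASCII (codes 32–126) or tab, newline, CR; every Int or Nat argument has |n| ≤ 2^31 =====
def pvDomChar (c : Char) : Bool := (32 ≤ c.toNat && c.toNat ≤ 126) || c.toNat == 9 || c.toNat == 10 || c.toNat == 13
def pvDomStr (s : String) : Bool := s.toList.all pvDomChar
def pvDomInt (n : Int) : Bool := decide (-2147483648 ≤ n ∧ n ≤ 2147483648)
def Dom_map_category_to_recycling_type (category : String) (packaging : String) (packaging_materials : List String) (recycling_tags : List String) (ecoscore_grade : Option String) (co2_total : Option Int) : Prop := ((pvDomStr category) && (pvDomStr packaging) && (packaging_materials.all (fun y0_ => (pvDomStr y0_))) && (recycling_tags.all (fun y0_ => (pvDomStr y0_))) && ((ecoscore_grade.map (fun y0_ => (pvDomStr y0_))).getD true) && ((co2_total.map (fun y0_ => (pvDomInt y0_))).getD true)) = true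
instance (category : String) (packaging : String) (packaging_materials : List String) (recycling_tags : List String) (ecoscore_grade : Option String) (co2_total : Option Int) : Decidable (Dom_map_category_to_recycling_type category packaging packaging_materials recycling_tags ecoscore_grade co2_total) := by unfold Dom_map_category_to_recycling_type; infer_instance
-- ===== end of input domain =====

-- B replaces A's seven-branch early-return if-cascade by a single pass over one flat
-- (pattern, is_material, bin-index) stream that collects ALL matching bin indices and then
-- takes the minimum (= highest-priority) one (objective: alternative). Neither version
-- mutates its arguments.

-- ===== PORT A =====
-- 'any(keyword in text for keyword in kws)' on the lowered category+packaging string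
def pvAnyKw (kws : List String) (text : List Char) : Bool :=
  kws.any (fun k => PySem.Chars.isIn k.toList text)

def map_category_to_recycling_type (category : String) (packaging : String) (packaging_materials : List String) (recycling_tags : List String) (ecoscore_grade : Option String) (co2_total : Option Int) : (String × String) × Int :=
  let category := PySem.Chars.lower category.toList
  let packaging := PySem.Chars.lower packaging.toList
  let bins : List (String × String) := [
    ("Verte", "Verre (sans bouchons ni couvercles)"),
    ("Jaune", "Plastique, carton et emballages"),
    ("Bleue", "Papier et journaux"),
    ("Rouge", "Métal"),
    ("Noire", "Déchets ménagers classiques"),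
    ("Marron", "Biodéchets"),
    ("Déchets spéciaux", "Piles, électroniques et déchets dangereux"),
    ("Autre", "Non catégorisé")]
  let text := category ++ packaging
  if pvAnyKw ["verre", "bocal", "bouteille en verre", "pot",
      "glass", "jar", "glass bottle", "container", "fr:bocal", "fr:verre"] text
     || packaging_materials.contains "en:glass" then
    (bins.getD 0 ("", ""), 4)
  else if pvAnyKw ["plastique", "carton", "papier", "emballage", "bouteille", "canette", "alu", "aluminium",
      "plastic", "cardboard", "paper", "packaging", "bottle", "can", "aluminum",
      "card-box", "pet-bottle", "mixed plastic-bag", "fr:sac plastique", "fr:bouteille en pet",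
      "fr:carton plastique", "étui"] text
     || ["en:plastic", "en:pet-1-polyethylene-terephthalate", "en:cardboard"].any
          (fun material => packaging_materials.contains material) then
    (bins.getD 1 ("", ""), 5)
  else if pvAnyKw ["papier", "journaux", "prospectus", "annuaires",
      "paper", "newspaper", "brochures", "fr:papier", "fr:prospectus"] text then
    (bins.getD 2 ("", ""), 6)
  else if pvAnyKw ["metal", "aluminium", "can", "boîte métal", "steel-can",
      "aluminum", "drink can", "fr:canette métal recyclabbe à l'infini",
      "fr:cannette aluminium", "fr:boîte métal à recycler", "fr:boîte en métal"] text
     || packaging_materials.contains "en:aluminium" then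
    (bins.getD 3 ("", ""), 6)
  else if pvAnyKw ["organique", "compost", "déchets alimentaires", "épluchures",
      "organic", "food waste", "compostable", "kitchen waste", "peelings",
      "fr:compost", "fr:épluchures", "fr:organique"] text then
    (bins.getD 5 ("", ""), 7)
  else if pvAnyKw ["ordures ménagères", "non recyclable", "déchet général", "restes",
      "household waste", "non-recyclable", "general waste", "leftovers",
      "fr:non recyclable", "fr:restes", "fr:ordures ménagères"] text then
    (bins.getD 4 ("", ""), 3)
  else if pvAnyKw ["pile", "batterie", "électronique", "électroménager", "téléphone", "ordinateur", "déchet dangereux",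
      "battery", "electronics", "appliance", "phone", "computer", "hazardous waste",
      "fr:pile", "fr:électronique", "fr:batterie", "fr:déchets dangereux"] text then
    (bins.getD 6 ("", ""), 10)
  -- 'if ecoscore_grade and ecoscore_grade.lower() in ['a', 'b']': '' is falsy
  else if (match ecoscore_grade with
           | some g => decide (g ≠ "") && ["a", "b"].contains (PySem.Str.lower g)
           | none => false) then
    (bins.getD 1 ("", ""), 6)
  else
    (bins.getD 7 ("", ""), 1)

-- ===== PORT B =====
-- _GROUPS: (keyword list, material list) per bin rule, in priority order
def pvGroups : List (List String × List String) := [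
  (["verre", "bocal", "bouteille en verre", "pot",
    "glass", "jar", "glass bottle", "container", "fr:bocal", "fr:verre"],
   ["en:glass"]),
  (["plastique", "carton", "papier", "emballage", "bouteille", "canette", "alu", "aluminium",
    "plastic", "cardboard", "paper", "packaging", "bottle", "can", "aluminum",
    "card-box", "pet-bottle", "mixed plastic-bag", "fr:sac plastique", "fr:bouteille en pet",
    "fr:carton plastique", "étui"],
   ["en:plastic", "en:pet-1-polyethylene-terephthalate", "en:cardboard"]),
  (["papier", "journaux", "prospectus", "annuaires",
    "paper", "newspaper", "brochures", "fr:papier", "fr:prospectus"],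
   []),
  (["metal", "aluminium", "can", "boîte métal", "steel-can",
    "aluminum", "drink can", "fr:canette métal recyclabbe à l'infini",
    "fr:cannette aluminium", "fr:boîte métal à recycler", "fr:boîte en métal"],
   ["en:aluminium"]),
  (["organique", "compost", "déchets alimentaires", "épluchures",
    "organic", "food waste", "compostable", "kitchen waste", "peelings",
    "fr:compost", "fr:épluchures", "fr:organique"],
   []),
  (["ordures ménagères", "non recyclable", "déchet général", "restes",
    "household waste", "non-recyclable", "general waste", "leftovers",
    "fr:non recyclable", "fr:restes", "fr:ordures ménagères"],
   []),
  (["pile", "batterie", "électronique", "électroménager", "téléphone", "ordinateur", "déchet dangereux",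
    "battery", "electronics", "appliance", "phone", "computer", "hazardous waste",
    "fr:pile", "fr:électronique", "fr:batterie", "fr:déchets dangereux"],
   [])]

-- _RESULTS
def pvResults : List ((String × String) × Int) := [
  (("Verte", "Verre (sans bouchons ni couvercles)"), 4),
  (("Jaune", "Plastique, carton et emballages"), 5),
  (("Bleue", "Papier et journaux"), 6),
  (("Rouge", "Métal"), 6),
  (("Marron", "Biodéchets"), 7),
  (("Noire", "Déchets ménagers classiques"), 3),
  (("Déchets spéciaux", "Piles, électroniques et déchets dangereux"), 10)]

-- _PATTERNS: one flat (pattern, is_material, index) stream, via the enumerate comprehension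
def pvPatterns : List (String × Bool × Int) :=
  (PySem.List.enumerate pvGroups).flatMap (fun g =>
    g.2.1.map (fun p => (p, false, g.1)) ++ g.2.2.map (fun p => (p, true, g.1)))

def map_category_to_recycling_type_alt (category : String) (packaging : String) (packaging_materials : List String) (recycling_tags : List String) (ecoscore_grade : Option String) (co2_total : Option Int) : (String × String) × Int :=
  let text := PySem.Chars.lower category.toList ++ PySem.Chars.lower packaging.toList
  -- matched = [i for (p, is_mat, i) in _PATTERNS if (p in packaging_materials if is_mat else p in text)]
  let matched := (pvPatterns.filter (fun q =>
    if q.2.1 then packaging_materials.contains q.1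
    else PySem.Chars.isIn q.1.toList text)).map (fun q => q.2.2)
  -- 'if matched: return _RESULTS[min(matched)]' — min of a nonempty list, in-range index
  match PySem.List.min? matched (fun x => x) with
  | some m => (PySem.List.pyGet? pvResults m).getD (("", ""), 0)
  | none =>
    if (match ecoscore_grade with
        | some g => decide (g ≠ "") && ["a", "b"].contains (PySem.Str.lower g)
        | none => false) then
      (("Jaune", "Plastique, carton et emballages"), 6)
    else
      (("Autre", "Non catégorisé"), 1)

-- ===== PRECONDITION & SPEC =====
def Spec_map_category_to_recycling_type (category : String) (packaging : String) (packaging_materials : List String) (recycling_tags : List String) (ecoscore_grade : Option String) (co2_total : Option Int) (out : (String × String) × Int) : Prop := out = map_category_to_recycling_type_alt category packaging packaging_materials recycling_tags ecoscore_grade co2_total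
instance (category : String) (packaging : String) (packaging_materials : List String) (recycling_tags : List String) (ecoscore_grade : Option String) (co2_total : Option Int) (out : (String × String) × Int) : Decidable (Spec_map_category_to_recycling_type category packaging packaging_materials recycling_tags ecoscore_grade co2_total out) := by unfold Spec_map_category_to_recycling_type; infer_instance

-- ===== CLAIM (what is proved, stated in full; the proofs are below) =====
def Claim_equal_map_category_to_recycling_type : Prop := ∀ (category : String) (packaging : String) (packaging_materials : List String) (recycling_tags : List String) (ecoscore_grade : Option String) (co2_total : Option Int), Dom_map_category_to_recycling_type category packaging packaging_materials recycling_tags ecoscore_grade co2_total → Spec_map_category_to_recycling_type category packaging packaging_materials recycling_tags ecoscore_grade co2_total (map_category_to_recycling_type category packaging packaging_materials recycling_tags ecoscore_grade co2_total)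

-- ===== LEMMAS AND PROOFS =====

-- proof-side recursive presentation of the flat pattern stream, with explicit start index
def pvFlatF (k : Int) : List (List String × List String) → List (String × Bool × Int)
  | [] => []
  | (kws, ms) :: t =>
    kws.map (fun p => (p, false, k)) ++ ms.map (fun p => (p, true, k)) ++ pvFlatF (k + 1) t

lemma pvFlat_eq (gs : List (List String × List String)) : ∀ (k : Int),
    (PySem.List.enumerate gs k).flatMap (fun g =>
      g.2.1.map (fun p => (p, false, g.1)) ++ g.2.2.map (fun p => (p, true, g.1))) = pvFlatF k gs := by
  induction gs with
  | nil => intro k; simp [PySem.List.enumerate_nil, pvFlatF]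
  | cons g t ih =>
    intro k
    obtain ⟨kws, ms⟩ := g
    simp [PySem.List.enumerate_cons, pvFlatF, ih (k + 1), List.append_assoc]

lemma pvFlatF_idx_ge (text : List Char) (mats : List String) :
    ∀ (gs : List (List String × List String)) (k : Int) (j : Int),
      j ∈ ((pvFlatF k gs).filter (fun q =>
        if q.2.1 then mats.contains q.1 else PySem.Chars.isIn q.1.toList text)).map (fun q => q.2.2) →
      k ≤ j := by
  intro gs
  induction gs with
  | nil => intro k j h; simp [pvFlatF] at h
  | cons g t ih =>
    intro k j h
    obtain ⟨kws, ms⟩ := g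
    simp only [pvFlatF, List.filter_append, List.map_append, List.mem_append] at h
    rcases h with (h | h) | h
    · obtain ⟨q, hq, rfl⟩ := List.mem_map.mp h
      obtain ⟨p, _, rfl⟩ := List.mem_map.mp (List.mem_filter.mp hq).1
      exact le_refl k
    · obtain ⟨q, hq, rfl⟩ := List.mem_map.mp h
      obtain ⟨p, _, rfl⟩ := List.mem_map.mp (List.mem_filter.mp hq).1
      exact le_refl k
    · have := ih (k + 1) j h; omega

lemma pvFoldlMin_const (a : Int) : ∀ (l : List Int), (∀ x ∈ l, a ≤ x) → l.foldl min a = a := by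
  intro l
  induction l generalizing a with
  | nil => intro _; rfl
  | cons x t ih =>
    intro h
    have hx : min a x = a := min_eq_left (h x (by simp))
    simp only [List.foldl_cons, hx]
    exact ih a (fun y hy => h y (by simp [hy]))

-- min over a constant-index prefix followed by indices ≥ i
lemma pvMinConstPrefix {α : Type} (xs : List α) (i : Int) (rest : List Int)
    (hrest : ∀ j ∈ rest, i ≤ j) :
    PySem.List.min? (xs.map (fun _ => i) ++ rest) (fun x => x) =
      if xs.isEmpty then PySem.List.min? rest (fun x => x) else some i := by
  cases xs with
  | nil => simp
  | cons x t =>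
    simp only [List.map_cons, List.cons_append, PySem.List.min?_id_cons, List.isEmpty_cons,
      if_neg (by simp : ¬ (false = true))]
    congr 1
    apply pvFoldlMin_const
    intro y hy
    rcases List.mem_append.mp hy with h | h
    · rcases List.mem_map.mp h with ⟨_, _, rfl⟩; exact le_refl i
    · exact hrest y h

-- ((kws.map (p ↦ (p,b,i))).filter pr).map (·.2.2) is a constant-index list gated by the per-pattern test
lemma pvMapFilter (b : Bool) (i : Int) (pr : String × Bool × Int → Bool) : ∀ (kws : List String),
    ((kws.map (fun p => (p, b, i))).filter pr).map (fun q => q.2.2) =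
      (kws.filter (fun p => pr (p, b, i))).map (fun _ => i) := by
  intro kws
  induction kws with
  | nil => rfl
  | cons p t ih =>
    simp only [List.map_cons, List.filter_cons]
    by_cases h : pr (p, b, i) = true
    · simp [h, ih]
    · simp [h, ih]

lemma pvFilterEmpty_iff (p : String → Bool) (l : List String) :
    (l.filter p).isEmpty = !(l.any p) := by
  induction l with
  | nil => rfl
  | cons x t ih =>
    by_cases h : p x = true <;> simp [List.filter_cons, List.any_cons, h, ih]

-- the first-matching-group index, A's cascade shape
def pvFirstIdx (text : List Char) (mats : List String) (k : Int) :
    List (List String × List String) → Option Int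
  | [] => none
  | (kws, ms) :: t =>
    if kws.any (fun w => PySem.Chars.isIn w.toList text) || ms.any (fun m => mats.contains m)
    then some k else pvFirstIdx text mats (k + 1) t

-- MAIN: min over the matched indices of the flat stream = index of the first matching group
lemma pvMinFlat (text : List Char) (mats : List String) :
    ∀ (gs : List (List String × List String)) (k : Int),
      PySem.List.min? (((pvFlatF k gs).filter (fun q =>
        if q.2.1 then mats.contains q.1 else PySem.Chars.isIn q.1.toList text)).map (fun q => q.2.2))
        (fun x => x) = pvFirstIdx text mats k gs := by
  intro gs
  induction gs with
  | nil => intro k; simp [pvFlatF, pvFirstIdx]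
  | cons g t ih =>
    intro k
    obtain ⟨kws, ms⟩ := g
    simp only [pvFlatF, List.filter_append, List.map_append, pvMapFilter]
    rw [List.append_assoc] at *
    rw [pvMinConstPrefix]
    · rw [pvMinConstPrefix]
      · simp only [pvFilterEmpty_iff, pvFirstIdx, ih (k + 1)]
        cases hk : kws.any (fun w => PySem.Chars.isIn w.toList text) <;>
          cases hm : ms.any (fun m => mats.contains m) <;> simp [hk, hm]
        · intro x hx hmem
          simp only [List.any_eq_false] at hm
          exact absurd (show mats.contains x = true by simpa using hmem) (hm x hx)
        · intro h
          obtain ⟨x, hx, hc⟩ := List.any_eq_true.mp hm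
          exact absurd (by simpa using hc) (h x hx)
      · intro j hj; have := pvFlatF_idx_ge text mats t (k + 1) j hj; omega
    · intro j hj
      rcases List.mem_append.mp hj with h | h
      · rcases List.mem_map.mp h with ⟨_, _, rfl⟩; exact le_refl k
      · have := pvFlatF_idx_ge text mats t (k + 1) j h; omega

-- ===== VERDICT (by name: the statement is the Claim_ definition above) =====
theorem map_category_to_recycling_type_spec : Claim_equal_map_category_to_recycling_type := by
  intro category packaging packaging_materials recycling_tags ecoscore_grade co2_total _
  unfold Spec_map_category_to_recycling_type
  simp only [map_category_to_recycling_type, map_category_to_recycling_type_alt, pvAnyKw,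
    pvPatterns, pvFlat_eq, pvMinFlat]
  simp only [pvGroups, pvFirstIdx, List.any_cons, List.any_nil, Bool.or_false]
  split_ifs <;> rfl
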